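-- pv_equiv track=rewrite | github.com/eunsu-park/eunsu-park.github.io | study/examples/Algorithm/python/28_advanced_dp.py | dp_with_monotone_queue
-- ===== SOURCE A (Python) =====
-- from typing import List, Tuple, Callable
-- from collections import deque
--
-- def dp_with_monotone_queue(arr: List[int], k: int) -> List[int]:
--     """
--     DP with Monotone Queue
--     dp[i] = max(dp[j] + arr[i]) for i-k <= j < i
--     시간복잡도: O(n)
--     """
--     n = len(arr)
--     dp = [0] * n
--     dq = deque()  # (인덱스, dp값)
--
--     for i in range(n):
--         # 범위 밖 제거
--         while dq and dq[0][0] < i - k: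
--             dq.popleft()
--
--         # 최댓값으로 dp 계산
--         if dq:
--             dp[i] = dq[0][1] + arr[i]
--         else:
--             dp[i] = arr[i]
--
--         # 현재 dp값 삽입
--         while dq and dq[-1][1] <= dp[i]:
--             dq.pop()
--         dq.append((i, dp[i]))
--
--     return dp
-- ===== SOURCE B (Python) =====
-- def dp_with_monotone_queue(arr, k):
--     """Same DP, computed by a direct nested rescan of the previous window
--     (dp[i] = arr[i] + max(dp[max(0, i-k) : i]), or arr[i] if that window is empty)."""
--     dp = []
--     for i in range(len(arr)):
--         best = None
--         for j in range(max(0, i - k), i):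
--             if best is None or dp[j] > best:
--                 best = dp[j]
--         dp.append(arr[i] if best is None else arr[i] + best)
--     return dp
-- ===== Notes on version B (the rewrite author's own statement) =====
-- stated objective: simpler
-- what changed: Replaces the amortized monotone-deque sliding-window maximum with a plain nested loop that rescans the previous min(i,k) dp values at every step.
import Mathlib
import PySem

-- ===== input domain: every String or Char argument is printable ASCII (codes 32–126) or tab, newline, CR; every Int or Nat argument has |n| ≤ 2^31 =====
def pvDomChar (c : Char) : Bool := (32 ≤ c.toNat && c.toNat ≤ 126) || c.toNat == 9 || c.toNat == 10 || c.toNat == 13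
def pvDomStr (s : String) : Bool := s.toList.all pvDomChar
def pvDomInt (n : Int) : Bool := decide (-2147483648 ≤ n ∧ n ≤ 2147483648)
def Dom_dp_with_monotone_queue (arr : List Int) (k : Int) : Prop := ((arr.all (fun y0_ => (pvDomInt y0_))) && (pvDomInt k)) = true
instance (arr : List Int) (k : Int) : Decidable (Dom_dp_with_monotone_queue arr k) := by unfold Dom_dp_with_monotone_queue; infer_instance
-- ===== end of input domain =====

-- B replaces the amortized monotone-deque sliding-window maximum with a plain nested
-- rescan of the previous window (objective: simpler; same return value, no speed claim).

-- ===== PORT A =====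
-- A preallocates dp = [0]*n and assigns dp[i] in order of i; the port builds the same
-- list by appending the i-th value at step i.  The two while-pop loops are exact:
-- popleft-while = dropWhile at the front, pop-while = dropWhile on the reverse.
def pvStepA (arr : List Int) (k : Int) (st : List Int × List (Int × Int)) (i : Nat) : List Int × List (Int × Int) :=
  let dq1 := st.2.dropWhile (fun p => decide (p.1 < (i : Int) - k))
  let v : Int :=
    match dq1.head? with
    | some p => p.2 + arr.getD i 0      -- arr[i], i always in range here
    | none => arr.getD i 0
  (st.1 ++ [v], (dq1.reverse.dropWhile (fun p => decide (p.2 ≤ v))).reverse ++ [((i : Int), v)])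

def dp_with_monotone_queue (arr : List Int) (k : Int) : List Int :=
  ((List.range arr.length).foldl (pvStepA arr k) ([], [])).1

-- ===== PORT B =====
-- inner loop: running max (as Option) of dp[j] for j in range(max(0, i－k), i)
def pvInnerB (dp : List Int) (best : Option Int) (j : Int) : Option Int :=
  match best with
  | none => some (dp.getD j.toNat 0)    -- dp[j], 0 ≤ j < len(dp) here
  | some b => if dp.getD j.toNat 0 > b then some (dp.getD j.toNat 0) else some b

def pvStepB (arr : List Int) (k : Int) (dp : List Int) (i : Nat) : List Int :=
  let best := (PySem.List.pyRange (max 0 ((i : Int) - k)) (i : Int) 1).foldl (pvInnerB dp) none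
  dp ++ [match best with
         | none => arr.getD i 0
         | some b => arr.getD i 0 + b]

def dp_with_monotone_queue_alt (arr : List Int) (k : Int) : List Int :=
  (List.range arr.length).foldl (pvStepB arr k) []

-- ===== PRECONDITION & SPEC =====
def Spec_dp_with_monotone_queue (arr : List Int) (k : Int) (out : List Int) : Prop := out = dp_with_monotone_queue_alt arr k
instance (arr : List Int) (k : Int) (out : List Int) : Decidable (Spec_dp_with_monotone_queue arr k out) := by unfold Spec_dp_with_monotone_queue; infer_instance

-- ===== CLAIM (what is proved, stated in full; the proofs are below) =====
def Claim_equal_dp_with_monotone_queue : Prop := ∀ (arr : List Int) (k : Int), Dom_dp_with_monotone_queue arr k → Spec_dp_with_monotone_queue arr k (dp_with_monotone_queue arr k)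

-- ===== LEMMAS AND PROOFS =====

-- B's dp list after t steps
def pvDp (arr : List Int) (k : Int) : Nat → List Int
  | 0 => []
  | t + 1 => pvStepB arr k (pvDp arr k t) t

-- the deque invariant after t steps of A's loop
def pvInv (arr : List Int) (k : Int) (t : Nat) (dq : List (Int × Int)) : Prop :=
  (∀ p ∈ dq, 0 ≤ p.1 ∧ p.1 < (t : Int) ∧ p.2 = (pvDp arr k t).getD p.1.toNat 0) ∧
  dq.Pairwise (fun p q => p.1 < q.1 ∧ q.2 ≤ p.2) ∧
  (∀ j : Nat, j < t → (t : Int) - 1 - k ≤ (j : Int) →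
    ∃ p ∈ dq, (j : Int) ≤ p.1 ∧ (pvDp arr k t).getD j 0 ≤ p.2)

lemma pvDp_length (arr : List Int) (k : Int) (t : Nat) : (pvDp arr k t).length = t := by
  induction t with
  | zero => rfl
  | succ t ih => simp [pvDp, pvStepB, ih]

lemma pvDp_getD_succ (arr : List Int) (k : Int) (t j : Nat) (h : j < t) :
    (pvDp arr k (t + 1)).getD j 0 = (pvDp arr k t).getD j 0 := by
  show (pvStepB arr k (pvDp arr k t) t).getD j 0 = _
  unfold pvStepB
  rw [List.getD_append]
  rw [pvDp_length]; exact h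

lemma getD_snoc_length (l : List Int) (a : Int) : (l ++ [a]).getD l.length 0 = a := by
  rw [List.getD_append_right l [a] 0 l.length (le_refl _)]
  simp

lemma not_pred_head_dropWhile {α : Type} (p : α → Bool) :
    ∀ (l : List α) {h : α} {rest : List α}, l.dropWhile p = h :: rest → ¬ p h := by
  intro l
  induction l with
  | nil => intro h rest he; simp [List.dropWhile] at he
  | cons a l ih =>
    intro h rest he
    by_cases hp : p a
    · rw [List.dropWhile_cons_of_pos hp] at he; exact ih he
    · rw [List.dropWhile_cons_of_neg hp] at he
      cases he; simpa using hp

lemma mem_dropWhile_of_not {α : Type} (p : α → Bool) {l : List α} {x : α}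
    (hx : x ∈ l) (hnp : ¬ p x) : x ∈ l.dropWhile p := by
  have hsplit := List.takeWhile_append_dropWhile (p := p) (l := l)
  rw [← hsplit] at hx
  rcases List.mem_append.1 hx with h | h
  · exact absurd (List.mem_takeWhile_imp h) hnp
  · exact h

-- the inner fold of B is PySem's first-max over the window values
lemma inner_foldl_some (l : List Int) (b : Int) :
    l.foldl (fun s v => match s with
      | none => some v
      | some b => if v > b then some v else some b) (some b) = some (l.foldl max b) := by
  induction l generalizing b with
  | nil => rfl
  | cons v l ih =>
    simp only [List.foldl_cons]
    rw [show (if v > b then some v else some b) = some (max b v) by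
      split_ifs with h <;> (congr 1; omega)]
    exact ih (max b v)

lemma inner_eq_max? (dp : List Int) (js : List Int) :
    js.foldl (pvInnerB dp) none
      = PySem.List.max? (js.map (fun j => dp.getD j.toNat 0)) (fun y => y) := by
  have hmap : js.foldl (pvInnerB dp) none
      = (js.map (fun j => dp.getD j.toNat 0)).foldl (fun s v => match s with
          | none => some v
          | some b => if v > b then some v else some b) none := by
    rw [List.foldl_map]
    rfl
  rw [hmap]
  cases hv : js.map (fun j => dp.getD j.toNat 0) with
  | nil => rfl
  | cons v vs =>
    rw [PySem.List.max?_id_cons]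
    simpa using inner_foldl_some vs v

-- the value B appends at step t
def pvVal (arr : List Int) (k : Int) (t : Nat) : Int :=
  match (PySem.List.pyRange (max 0 ((t : Int) - k)) (t : Int) 1).foldl (pvInnerB (pvDp arr k t)) none with
  | none => arr.getD t 0
  | some b => arr.getD t 0 + b

lemma pvDp_succ (arr : List Int) (k : Int) (t : Nat) :
    pvDp arr k (t + 1) = pvDp arr k t ++ [pvVal arr k t] := rfl

lemma pvDp_getD_last (arr : List Int) (k : Int) (t : Nat) :
    (pvDp arr k (t + 1)).getD t 0 = pvVal arr k t := by
  have h2 := getD_snoc_length (pvDp arr k t) (pvVal arr k t)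
  rw [pvDp_length] at h2
  rw [pvDp_succ, h2]

-- A's head-of-pruned-deque value agrees with B's rescanned window maximum
lemma value_eq (arr : List Int) (k : Int) (t : Nat) (dq : List (Int × Int))
    (hent : ∀ p ∈ dq, 0 ≤ p.1 ∧ p.1 < (t : Int) ∧ p.2 = (pvDp arr k t).getD p.1.toNat 0)
    (hpair : dq.Pairwise (fun p q => p.1 < q.1 ∧ q.2 ≤ p.2))
    (hcov : ∀ j : Nat, j < t → (t : Int) - 1 - k ≤ (j : Int) →
      ∃ p ∈ dq, (j : Int) ≤ p.1 ∧ (pvDp arr k t).getD j 0 ≤ p.2) :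
    (match (dq.dropWhile (fun p => decide (p.1 < (t : Int) - k))).head? with
     | some p => p.2 + arr.getD t 0
     | none => arr.getD t 0) = pvVal arr k t := by
  have hdq1sub : ∀ p ∈ dq.dropWhile (fun p => decide (p.1 < (t : Int) - k)), p ∈ dq :=
    fun p hp => (List.dropWhile_sublist _).subset hp
  have hdq1pair : (dq.dropWhile (fun p => decide (p.1 < (t : Int) - k))).Pairwise
      (fun p q => p.1 < q.1 ∧ q.2 ≤ p.2) :=
    List.Pairwise.sublist (List.dropWhile_sublist _) hpair
  by_cases hlt : max 0 ((t : Int) - k) < (t : Int)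
  case neg =>
    -- empty window: the pruned deque is empty too
    have hjs : PySem.List.pyRange (max 0 ((t : Int) - k)) (t : Int) 1 = [] :=
      PySem.List.pyRange_one_eq_nil (by omega)
    cases hq : dq.dropWhile (fun p => decide (p.1 < (t : Int) - k)) with
    | nil => unfold pvVal; rw [hjs]; rfl
    | cons h rest =>
      exfalso
      have hh : h ∈ dq := hdq1sub h (by rw [hq]; exact List.mem_cons_self)
      have hnp := not_pred_head_dropWhile _ dq hq
      have h1 := hent h hh
      simp only [decide_eq_true_eq] at hnp
      omega
  case pos =>
    -- nonempty window
    have hk : 0 < k := by omega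
    have ht : 0 < t := by omega
    -- the pruned deque is nonempty: cover index t-1
    obtain ⟨p0, hp0dq, hp0ge, -⟩ := hcov (t - 1) (by omega) (by omega)
    have hp0dq1 : p0 ∈ dq.dropWhile (fun p => decide (p.1 < (t : Int) - k)) := by
      refine mem_dropWhile_of_not _ hp0dq ?_
      simp only [decide_eq_true_eq, not_lt]
      omega
    cases hq : dq.dropWhile (fun p => decide (p.1 < (t : Int) - k)) with
    | nil => rw [hq] at hp0dq1; simp at hp0dq1
    | cons h rest =>
      have hh : h ∈ dq := hdq1sub h (by rw [hq]; exact List.mem_cons_self)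
      obtain ⟨hh0, hh1, hh2⟩ := hent h hh
      have hnp := not_pred_head_dropWhile _ dq hq
      simp only [decide_eq_true_eq, not_lt] at hnp
      -- h.2 is a window value
      have hattain : h.2 ∈ (PySem.List.pyRange (max 0 ((t : Int) - k)) (t : Int) 1).map
          (fun j => (pvDp arr k t).getD j.toNat 0) := by
        refine List.mem_map.mpr ⟨h.1, ?_, hh2.symm⟩
        exact (PySem.List.mem_pyRange_one).mpr ⟨by omega, hh1⟩
      -- h.2 bounds every window value
      have hbound : ∀ w ∈ (PySem.List.pyRange (max 0 ((t : Int) - k)) (t : Int) 1).map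
          (fun j => (pvDp arr k t).getD j.toNat 0), w ≤ h.2 := by
        intro w hw
        obtain ⟨j, hjmem, rfl⟩ := List.mem_map.mp hw
        obtain ⟨hjlo, hjhi⟩ := (PySem.List.mem_pyRange_one).mp hjmem
        obtain ⟨p, hpdq, hjp, hple⟩ := hcov j.toNat (by omega) (by omega)
        rw [Int.toNat_of_nonneg (by omega)] at hjp
        have hpdq1 : p ∈ dq.dropWhile (fun p => decide (p.1 < (t : Int) - k)) := by
          refine mem_dropWhile_of_not _ hpdq ?_
          simp only [decide_eq_true_eq, not_lt]
          omega
        rw [hq] at hpdq1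
        have hph : p.2 ≤ h.2 := by
          rcases List.mem_cons.mp hpdq1 with rfl | hpr
          · exact le_refl _
          · exact (List.rel_of_pairwise_cons (hq ▸ hdq1pair) hpr).2
        exact le_trans hple hph
      -- the inner fold is the window maximum, which equals h.2
      unfold pvVal
      rw [inner_eq_max?]
      cases hm : PySem.List.max? ((PySem.List.pyRange (max 0 ((t : Int) - k)) (t : Int) 1).map
          (fun j => (pvDp arr k t).getD j.toNat 0)) (fun y => y) with
      | none =>
        rw [PySem.List.max?_eq_none_iff] at hm
        rw [hm] at hattain
        simp at hattain
      | some m =>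
        have hmmem := PySem.List.max?_mem hm
        have hmax := PySem.List.max?_isMax hm
        have : m = h.2 := le_antisymm (hbound m hmmem) (hmax h.2 hattain)
        rw [this]
        show h.2 + arr.getD t 0 = arr.getD t 0 + h.2
        exact Int.add_comm _ _

-- the invariant is preserved by one step of A
lemma inv_step (arr : List Int) (k : Int) (t : Nat) (dq : List (Int × Int))
    (hent : ∀ p ∈ dq, 0 ≤ p.1 ∧ p.1 < (t : Int) ∧ p.2 = (pvDp arr k t).getD p.1.toNat 0)
    (hpair : dq.Pairwise (fun p q => p.1 < q.1 ∧ q.2 ≤ p.2))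
    (hcov : ∀ j : Nat, j < t → (t : Int) - 1 - k ≤ (j : Int) →
      ∃ p ∈ dq, (j : Int) ≤ p.1 ∧ (pvDp arr k t).getD j 0 ≤ p.2) :
    pvInv arr k (t + 1)
      (((dq.dropWhile (fun p => decide (p.1 < (t : Int) - k))).reverse.dropWhile
          (fun p => decide (p.2 ≤ pvVal arr k t))).reverse ++ [((t : Int), pvVal arr k t)]) := by
  have hdq1sub : ∀ p ∈ dq.dropWhile (fun p => decide (p.1 < (t : Int) - k)), p ∈ dq :=
    fun p hp => (List.dropWhile_sublist _).subset hp
  have hdq1pair : (dq.dropWhile (fun p => decide (p.1 < (t : Int) - k))).Pairwise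
      (fun p q => p.1 < q.1 ∧ q.2 ≤ p.2) :=
    List.Pairwise.sublist (List.dropWhile_sublist _) hpair
  have hkept_mem : ∀ p ∈ ((dq.dropWhile (fun p => decide (p.1 < (t : Int) - k))).reverse.dropWhile
      (fun p => decide (p.2 ≤ pvVal arr k t))).reverse,
      p ∈ dq.dropWhile (fun p => decide (p.1 < (t : Int) - k)) := by
    intro p hp
    have := (List.dropWhile_sublist _).subset (List.mem_reverse.mp hp)
    exact List.mem_reverse.mp this
  have hkept_dq : ∀ p ∈ ((dq.dropWhile (fun p => decide (p.1 < (t : Int) - k))).reverse.dropWhile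
      (fun p => decide (p.2 ≤ pvVal arr k t))).reverse, p ∈ dq :=
    fun p hp => hdq1sub p (hkept_mem p hp)
  have hkept_pair : (((dq.dropWhile (fun p => decide (p.1 < (t : Int) - k))).reverse.dropWhile
      (fun p => decide (p.2 ≤ pvVal arr k t))).reverse).Pairwise
      (fun p q => p.1 < q.1 ∧ q.2 ≤ p.2) := by
    have h1 : List.Sublist (((dq.dropWhile (fun p => decide (p.1 < (t : Int) - k))).reverse.dropWhile
        (fun p => decide (p.2 ≤ pvVal arr k t))).reverse)
        (dq.dropWhile (fun p => decide (p.1 < (t : Int) - k))) := by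
      simpa using (List.dropWhile_sublist
        (l := (dq.dropWhile (fun p => decide (p.1 < (t : Int) - k))).reverse)
        (fun p => decide (p.2 ≤ pvVal arr k t))).reverse
    exact List.Pairwise.sublist (h1.trans (List.dropWhile_sublist _)) hpair
  have hkept_gt : ∀ p ∈ ((dq.dropWhile (fun p => decide (p.1 < (t : Int) - k))).reverse.dropWhile
      (fun p => decide (p.2 ≤ pvVal arr k t))).reverse, pvVal arr k t < p.2 := by
    intro p hp
    have hprd := List.mem_reverse.mp hp
    cases hrd : (dq.dropWhile (fun p => decide (p.1 < (t : Int) - k))).reverse.dropWhile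
        (fun p => decide (p.2 ≤ pvVal arr k t)) with
    | nil => rw [hrd] at hprd; simp at hprd
    | cons h2 r2 =>
      have hnp := not_pred_head_dropWhile _ _ hrd
      simp only [decide_eq_true_eq, not_le] at hnp
      have hrevpair : ((dq.dropWhile (fun p => decide (p.1 < (t : Int) - k))).reverse).Pairwise
          (fun p q => q.1 < p.1 ∧ p.2 ≤ q.2) := List.pairwise_reverse.mpr hdq1pair
      have hrdpair := List.Pairwise.sublist (List.dropWhile_sublist
        (l := (dq.dropWhile (fun p => decide (p.1 < (t : Int) - k))).reverse)
        (fun p => decide (p.2 ≤ pvVal arr k t))) hrevpair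
      rw [hrd] at hrdpair hprd
      rcases List.mem_cons.mp hprd with rfl | hpr
      · exact hnp
      · exact lt_of_lt_of_le hnp (List.rel_of_pairwise_cons hrdpair hpr).2
  have hsplit : ∀ p ∈ dq.dropWhile (fun p => decide (p.1 < (t : Int) - k)),
      p ∈ ((dq.dropWhile (fun p => decide (p.1 < (t : Int) - k))).reverse.dropWhile
        (fun p => decide (p.2 ≤ pvVal arr k t))).reverse ∨ p.2 ≤ pvVal arr k t := by
    intro p hp
    have hpr : p ∈ (dq.dropWhile (fun p => decide (p.1 < (t : Int) - k))).reverse :=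
      List.mem_reverse.mpr hp
    rw [← List.takeWhile_append_dropWhile
      (p := fun p => decide (p.2 ≤ pvVal arr k t))
      (l := (dq.dropWhile (fun p => decide (p.1 < (t : Int) - k))).reverse)] at hpr
    rcases List.mem_append.mp hpr with h | h
    · right; simpa using List.mem_takeWhile_imp h
    · left; exact List.mem_reverse.mpr h
  refine ⟨?_, ?_, ?_⟩
  · intro p hp
    rcases List.mem_append.mp hp with hpk | hpt
    · obtain ⟨h0, h1, h2⟩ := hent p (hkept_dq p hpk)
      refine ⟨h0, by push_cast; omega, ?_⟩
      rw [pvDp_getD_succ arr k t _ (by omega)]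
      exact h2
    · rcases List.mem_singleton.mp hpt with rfl
      refine ⟨by positivity, by push_cast; omega, ?_⟩
      simp only [Int.toNat_natCast]
      exact (pvDp_getD_last arr k t).symm
  · rw [List.pairwise_append]
    refine ⟨hkept_pair, List.pairwise_singleton _ _, ?_⟩
    intro p hp q hq
    rcases List.mem_singleton.mp hq with rfl
    exact ⟨(hent p (hkept_dq p hp)).2.1, le_of_lt (hkept_gt p hp)⟩
  · intro j hj hge
    push_cast at hge
    by_cases hjt : j = t
    · subst hjt
      refine ⟨((j : Int), pvVal arr k j), List.mem_append_right _ ?_, le_refl _, ?_⟩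
      · simp
      · rw [pvDp_getD_last]
    · have hjlt : j < t := by omega
      obtain ⟨p, hpdq, hjp, hple⟩ := hcov j hjlt (by omega)
      have hpdq1 : p ∈ dq.dropWhile (fun p => decide (p.1 < (t : Int) - k)) := by
        refine mem_dropWhile_of_not _ hpdq ?_
        simp only [decide_eq_true_eq, not_lt]
        omega
      have hgd : (pvDp arr k (t + 1)).getD j 0 = (pvDp arr k t).getD j 0 :=
        pvDp_getD_succ arr k t j hjlt
      rcases hsplit p hpdq1 with hka | hkb
      · exact ⟨p, List.mem_append_left _ hka, hjp, by rw [hgd]; exact hple⟩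
      · refine ⟨((t : Int), pvVal arr k t), List.mem_append_right _ ?_, by omega, ?_⟩
        · simp
        · rw [hgd]
          exact le_trans hple hkb

-- one step of A, from a state satisfying the invariant
lemma stepA_correct
 (arr : List Int) (k : Int) (t : Nat) (dq : List (Int × Int))
    (hInv : pvInv arr k t dq) :
    pvStepA arr k (pvDp arr k t, dq) t = (pvDp arr k (t + 1),
      ((dq.dropWhile (fun p => decide (p.1 < (t : Int) - k))).reverse.dropWhile
          (fun p => decide (p.2 ≤ ((pvDp arr k (t+1)).getD t 0))) ).reverse ++ [((t : Int), (pvDp arr k (t+1)).getD t 0)]) ∧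
    pvInv arr k (t + 1)
      (((dq.dropWhile (fun p => decide (p.1 < (t : Int) - k))).reverse.dropWhile
          (fun p => decide (p.2 ≤ ((pvDp arr k (t+1)).getD t 0))) ).reverse ++ [((t : Int), (pvDp arr k (t+1)).getD t 0)]) := by
  obtain ⟨hent, hpair, hcov⟩ := hInv
  have hveq := value_eq arr k t dq hent hpair hcov
  have hlast := pvDp_getD_last arr k t
  constructor
  · rw [hlast, pvDp_succ]
    simp only [pvStepA]
    rw [hveq]
  · rw [hlast]
    exact inv_step arr k t dq hent hpair hcov

lemma foldA_main (arr : List Int) (k : Int) :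
    ∀ t : Nat, ∃ dq, (List.range t).foldl (pvStepA arr k) ([], []) = (pvDp arr k t, dq) ∧
      pvInv arr k t dq := by
  intro t
  induction t with
  | zero =>
    refine ⟨[], rfl, ?_, List.Pairwise.nil, ?_⟩
    · intro p hp; simp at hp
    · intro j hj; omega
  | succ t ih =>
    obtain ⟨dq, hf, hI⟩ := ih
    obtain ⟨heq, hI'⟩ := stepA_correct arr k t dq hI
    rw [List.range_succ, List.foldl_append, List.foldl_cons, List.foldl_nil, hf, heq]
    exact ⟨_, rfl, hI'⟩

lemma foldB_main (arr : List Int) (k : Int) :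
    ∀ t : Nat, (List.range t).foldl (pvStepB arr k) [] = pvDp arr k t := by
  intro t
  induction t with
  | zero => rfl
  | succ t ih => rw [List.range_succ, List.foldl_append, ih]; rfl

-- ===== VERDICT (by name: the statement is the Claim_ definition above) =====
theorem dp_with_monotone_queue_spec : Claim_equal_dp_with_monotone_queue := by
  intro arr k _
  unfold Spec_dp_with_monotone_queue dp_with_monotone_queue dp_with_monotone_queue_alt
  obtain ⟨dq, hfold, -⟩ := foldA_main arr k arr.length
  rw [hfold, foldB_main arr k arr.length]
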